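-- pv_equiv track=rewrite | github.com/mte-dgpr/arretify | bench_convertisseur_xml/segmentation_arrete/section_rules.py | filter_max_level_sections
-- ===== SOURCE A (Python) =====
-- def filter_max_level_sections(sections_dict, levels_dict):
--
--     # Group sections by their base type (without _number suffix)
--     grouped_sections = {}
--
--     for section_name in sections_dict:
--         # Extract base name (e.g., 'article' from 'article_0')
--         base_name = "_".join(section_name.split('_')[:-1])
--
--         # Initialize group if not exists
--         if base_name not in grouped_sections:
--             grouped_sections[base_name] = []
--
--         # Add section to its group
--         grouped_sections[base_name].append({
--             'full_name': section_name,
--             'pattern': sections_dict[section_name],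
--             'level': levels_dict[section_name]
--         })
--
--     # Initialize output dictionaries
--     filtered_patterns = {}
--     filtered_levels = {}
--
--     # For each group, keep only the highest level section
--     for base_name, sections in grouped_sections.items():
--         # Find the maximum level in this group
--         max_level = max(section['level'] for section in sections)
--
--         # Keep only sections with the maximum level
--         max_level_sections = [
--             section for section in sections
--             if section['level'] == max_level
--         ]
--
--         # Add all max level sections to the result
--         for section in max_level_sections:
--             filtered_patterns[section['full_name']] = section['pattern']
--             filtered_levels[section['full_name']] = section['level']
--
--     return filtered_patterns, filtered_levels
-- ===== SOURCE B (Python) =====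
-- def filter_max_level_sections(sections_dict, levels_dict):
--     # Pass 1: per base name, record the running maximum level and the group order.
--     max_level = {}
--     buckets = {}
--     for name in sections_dict:
--         base = "_".join(name.split('_')[:-1])
--         if base not in buckets:
--             buckets[base] = []
--         lvl = levels_dict[name]
--         if base not in max_level or lvl > max_level[base]:
--             max_level[base] = lvl
--     # Pass 2: keep the sections whose level equals their group's maximum.
--     for name, pattern in sections_dict.items():
--         base = "_".join(name.split('_')[:-1])
--         if levels_dict[name] == max_level[base]:
--             buckets[base].append((name, pattern))
--     # Emit groups in first-appearance order, names in appearance order.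
--     filtered_patterns = {}
--     filtered_levels = {}
--     for base, pairs in buckets.items():
--         for name, pattern in pairs:
--             filtered_patterns[name] = pattern
--             filtered_levels[name] = levels_dict[name]
--     return filtered_patterns, filtered_levels
-- ===== Notes on version B (the rewrite author's own statement) =====
-- stated objective: alternative
-- what changed: A builds per-group lists of full record dicts and then, group by group, takes the max and filters; B never stores records: one flat pass fills a base-name->running-max table and the group order, a second flat pass buckets just the (name, pattern) pairs whose level equals their group's precomputed max, and the buckets are replayed into the output dicts.
import Mathlib
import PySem

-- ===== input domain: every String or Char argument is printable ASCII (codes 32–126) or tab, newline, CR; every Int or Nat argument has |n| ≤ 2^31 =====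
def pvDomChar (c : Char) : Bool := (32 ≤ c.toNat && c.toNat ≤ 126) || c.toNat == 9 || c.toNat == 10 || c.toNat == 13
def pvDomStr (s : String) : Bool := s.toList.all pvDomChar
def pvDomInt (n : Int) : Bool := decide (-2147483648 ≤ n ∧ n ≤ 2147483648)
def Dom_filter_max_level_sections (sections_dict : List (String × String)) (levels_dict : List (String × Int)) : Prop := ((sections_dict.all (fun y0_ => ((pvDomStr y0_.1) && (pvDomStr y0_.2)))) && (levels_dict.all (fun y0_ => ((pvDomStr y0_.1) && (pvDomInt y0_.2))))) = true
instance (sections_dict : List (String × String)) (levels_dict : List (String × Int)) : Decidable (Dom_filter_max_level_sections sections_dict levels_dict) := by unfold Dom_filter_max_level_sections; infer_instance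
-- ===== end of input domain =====

-- B replaces A's per-group record lists (full_name/pattern/level dicts) by a precomputed
-- base-name → max-level table plus name buckets, filling them in two flat passes (objective: alternative).

-- '"_".join(name.split('_')[:-1])'; split? is always some here: the separator "_" is nonempty — the base-name expression both Python versions contain verbatim
def pvBase (name : String) : String :=
  PySem.Str.join "_" (PySem.List.slice ((PySem.Str.split? name "_").getD []) none (some (-1)))

-- ===== PORT A =====
def filter_max_level_sections (sections_dict : List (String × String)) (levels_dict : List (String × Int)) : (List (String × String)) × (List (String × Int)) :=
  let levels := PySem.Dict.ofList levels_dict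
  -- for section_name in sections_dict: group the records by base name
  let grouped : PySem.Dict String (List (String × String × Int)) :=
    sections_dict.foldl (fun grouped sp =>
      let base_name := pvBase sp.1
      let grouped := if grouped.contains base_name then grouped else grouped.insert base_name []
      -- levels_dict[section_name]: Pre_ guarantees the key is present, so the default 0 is never read
      grouped.modify base_name [] (fun g => g ++ [(sp.1, sp.2, levels.getD sp.1 0)]))
      PySem.Dict.empty
  -- for base_name, sections in grouped.items(): keep only max-level sections
  let res : PySem.Dict String String × PySem.Dict String Int :=
    grouped.items.foldl (fun res bs =>
      -- max(...): each group is nonempty by construction, so the default 0 is never read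
      let max_level := (PySem.List.max? (bs.2.map (fun sec => sec.2.2)) (fun x => x)).getD 0
      let max_level_sections := bs.2.filter (fun sec => sec.2.2 == max_level)
      max_level_sections.foldl (fun res sec => (res.1.insert sec.1 sec.2.1, res.2.insert sec.1 sec.2.2)) res)
      (PySem.Dict.empty, PySem.Dict.empty)
  (res.1.items, res.2.items)

-- ===== PORT B =====
def filter_max_level_sections_alt (sections_dict : List (String × String)) (levels_dict : List (String × Int)) : (List (String × String)) × (List (String × Int)) :=
  let levels := PySem.Dict.ofList levels_dict
  -- pass 1: running maximum level per base name, and the group order (buckets keys)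
  let p1 : PySem.Dict String Int × PySem.Dict String (List (String × String)) :=
    sections_dict.foldl (fun st sp =>
      let base := pvBase sp.1
      let buckets := if st.2.contains base then st.2 else st.2.insert base []
      let lvl := levels.getD sp.1 0   -- levels_dict[name]; Pre_ guarantees presence
      let max_level := if !st.1.contains base || lvl > st.1.getD base 0 then st.1.insert base lvl else st.1
      (max_level, buckets))
      (PySem.Dict.empty, PySem.Dict.empty)
  -- pass 2: keep the sections whose level equals their group's maximum
  let buckets : PySem.Dict String (List (String × String)) :=
    sections_dict.foldl (fun bk sp =>
      let base := pvBase sp.1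
      if levels.getD sp.1 0 == p1.1.getD base 0 then bk.modify base [] (fun l => l ++ [(sp.1, sp.2)]) else bk)
      p1.2
  -- emit groups in first-appearance order, names in appearance order
  let res : PySem.Dict String String × PySem.Dict String Int :=
    buckets.items.foldl (fun res bp =>
      bp.2.foldl (fun res np => (res.1.insert np.1 np.2, res.2.insert np.1 (levels.getD np.1 0))) res)
      (PySem.Dict.empty, PySem.Dict.empty)
  (res.1.items, res.2.items)

-- ===== PRECONDITION & SPEC =====
-- Pre_ excludes exactly the inputs on which the Python A raises KeyError: a section name absent from levels_dict
def Pre_filter_max_level_sections (sections_dict : List (String × String)) (levels_dict : List (String × Int)) : Prop :=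
  ∀ p ∈ sections_dict, p.1 ∈ levels_dict.map Prod.fst
instance (sections_dict : List (String × String)) (levels_dict : List (String × Int)) : Decidable (Pre_filter_max_level_sections sections_dict levels_dict) := by unfold Pre_filter_max_level_sections; infer_instance
def pvWitness_filter_max_level_sections : (List (String × String)) × (List (String × Int)) :=
  ([("article_0", "pat0"), ("article_1", "pat1"), ("chapter_0", "pc")], [("article_0", 1), ("article_1", 2), ("chapter_0", 1)])

def Spec_filter_max_level_sections (sections_dict : List (String × String)) (levels_dict : List (String × Int)) (out : (List (String × String)) × (List (String × Int))) : Prop := out = filter_max_level_sections_alt sections_dict levels_dict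
instance (sections_dict : List (String × String)) (levels_dict : List (String × Int)) (out : (List (String × String)) × (List (String × Int))) : Decidable (Spec_filter_max_level_sections sections_dict levels_dict out) := by unfold Spec_filter_max_level_sections; infer_instance

-- ===== CLAIM (what is proved, stated in full; the proofs are below) =====
def Claim_equal_filter_max_level_sections : Prop := ∀ (sections_dict : List (String × String)) (levels_dict : List (String × Int)), Dom_filter_max_level_sections sections_dict levels_dict → Pre_filter_max_level_sections sections_dict levels_dict → Spec_filter_max_level_sections sections_dict levels_dict (filter_max_level_sections sections_dict levels_dict)

-- ===== LEMMAS AND PROOFS =====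

-- proof-side vocabulary: the record of a section, its group, the group order, a running maximum
def pvRec (L : String → Int) (sp : String × String) : String × String × Int := (sp.1, sp.2, L sp.1)
def pvGrp (L : String → Int) (s : List (String × String)) (b : String) : List (String × String × Int) :=
  (s.filter (fun sp => pvBase sp.1 == b)).map (pvRec L)
def pvBases (s : List (String × String)) : List String := PySem.Set.ofList (s.map (fun sp => pvBase sp.1))
def pvMax : List Int → Option Int
  | [] => none
  | x :: t => some (t.foldl max x)

theorem pvMax_append_singleton (ys : List Int) (v : Int) :
    pvMax (ys ++ [v]) = some (match pvMax ys with | none => v | some m => max m v) := by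
  cases ys with
  | nil => simp [pvMax]
  | cons y t => simp [pvMax, List.foldl_append]

-- a dict whose items are literally known: getD of an all-[] dict is []
theorem getD_nil_of_items_const {ν : Type} (d : PySem.Dict String (List ν)) (c : String)
    (h : ∀ p ∈ d.items, p.2 = []) : d.getD c [] = [] := by
  rw [PySem.Dict.getD_eq_get?_getD]
  cases hf : d.get? c with
  | none => rfl
  | some v =>
    have := PySem.Dict.mem_items_of_get?_eq_some (d := d) hf
    simpa using h _ this

theorem items_eq_keys_map {κ ν : Type} [BEq κ] [LawfulBEq κ] (d : PySem.Dict κ ν) (d0 : ν)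
    (h : d.keys.Nodup) : d.items = d.keys.map (fun k => (k, d.getD k d0)) := by
  have : d.keys.map (fun k => (k, d.getD k d0)) = d.items.map (fun p => (p.1, d.getD p.1 d0)) := by
    simp [PySem.Dict.keys, List.map_map, Function.comp]
  rw [this]
  conv_lhs => rw [← List.map_id d.items]
  refine List.map_congr_left (fun p hp => ?_) |>.symm
  have : d.getD p.1 d0 = p.2 :=
    PySem.Dict.getD_of_mem_items (d := d) (by simpa using hp) h d0
  simp [this]

-- step of A's grouping loop: the explicit 'initialise then append' is one modify
theorem ifInsertModify {ν : Type} (g : PySem.Dict String (List ν)) (b : String) (f : List ν → List ν) :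
    ((if g.contains b then g else g.insert b []).modify b [] f) = g.modify b [] f := by
  by_cases hb : g.contains b
  · simp [hb]
  · simp only [hb, Bool.false_eq_true, if_false]
    apply PySem.Dict.ext
    simp only [PySem.Dict.modify, PySem.Dict.getD_insert_self]
    rw [PySem.Dict.getD_of_not_contains g [] (by simpa using hb)]
    rw [PySem.Dict.items_insert_of_contains _ _ (PySem.Dict.contains_insert_self g b [])]
    rw [PySem.Dict.items_insert_of_not_contains g _ (by simpa using hb)]
    rw [PySem.Dict.items_insert_of_not_contains g _ (by simpa using hb)]
    have : ∀ p ∈ g.items, p.1 ≠ b := by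
      intro p hp hcon
      simp only [PySem.Dict.contains, List.any_eq_true] at hb
      exact hb ⟨p, hp, by simp [hcon]⟩
    rw [List.map_append]
    congr 1
    · conv_rhs => rw [← List.map_id g.items]
      refine List.map_congr_left (fun p hp => ?_)
      simp [this p hp]
    · simp

-- A's grouping loop with the 'initialise then append' step collapsed to one modify
theorem groupA_fold (L : String → Int) (s : List (String × String)) :
    s.foldl (fun grouped sp =>
      (if grouped.contains (pvBase sp.1) then grouped else grouped.insert (pvBase sp.1) []).modify
        (pvBase sp.1) [] (fun g => g ++ [(sp.1, sp.2, L sp.1)])) PySem.Dict.empty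
    = s.foldl (fun grouped sp => grouped.modify (pvBase sp.1) [] (fun g => g ++ [(sp.1, sp.2, L sp.1)]))
        PySem.Dict.empty :=
  PySem.List.foldl_congr_mem _ _ _ _ (fun acc x _ => ifInsertModify acc (pvBase x.1) _)

theorem groupA_getD (L : String → Int) (s : List (String × String)) (b : String) :
    (s.foldl (fun grouped sp => grouped.modify (pvBase sp.1) [] (fun g => g ++ [(sp.1, sp.2, L sp.1)]))
      PySem.Dict.empty).getD b []
    = pvGrp L s b := by
  have he : (s.foldl (fun grouped sp => grouped.modify (pvBase sp.1) [] (fun g => g ++ [(sp.1, sp.2, L sp.1)]))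
      PySem.Dict.empty)
      = (s.map (fun sp => (pvBase sp.1, (sp.1, sp.2, L sp.1)))).foldl
          (fun d p => d.modify p.1 [] (fun x => x ++ [p.2])) PySem.Dict.empty :=
    (List.foldl_map (f := fun sp : String × String => (pvBase sp.1, (sp.1, sp.2, L sp.1)))
      (g := fun (d : PySem.Dict String (List (String × String × Int))) p => d.modify p.1 [] (fun x => x ++ [p.2]))
      (l := s) (init := PySem.Dict.empty)).symm
  rw [he, PySem.Dict.getD_foldl_modify_append]
  simp [List.filter_map, pvGrp, pvRec, Function.comp_def]

-- closed form of A's grouping dict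
theorem groupA_items (L : String → Int) (s : List (String × String)) :
    (s.foldl (fun grouped sp =>
      (if grouped.contains (pvBase sp.1) then grouped else grouped.insert (pvBase sp.1) []).modify
        (pvBase sp.1) [] (fun g => g ++ [(sp.1, sp.2, L sp.1)])) PySem.Dict.empty).items
    = (pvBases s).map (fun b => (b, pvGrp L s b)) := by
  rw [groupA_fold]
  have hnd : (s.foldl (fun grouped sp => grouped.modify (pvBase sp.1) [] (fun g => g ++ [(sp.1, sp.2, L sp.1)]))
      PySem.Dict.empty).keys.Nodup :=
    PySem.Dict.nodup_keys_foldl_modify_key s (fun sp => pvBase sp.1) []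
      (fun _ sp g => g ++ [(sp.1, sp.2, L sp.1)]) PySem.Dict.empty (by simp [PySem.Dict.empty])
  have hk : (s.foldl (fun grouped sp => grouped.modify (pvBase sp.1) [] (fun g => g ++ [(sp.1, sp.2, L sp.1)]))
      PySem.Dict.empty).keys = pvBases s := by
    rw [PySem.Dict.keys_foldl_modify_key s (fun sp => pvBase sp.1) []
      (fun _ sp g => g ++ [(sp.1, sp.2, L sp.1)]) PySem.Dict.empty]
    simp [pvBases, PySem.Dict.empty, PySem.Set.update_nil_left]
  rw [items_eq_keys_map _ ([] : List (String × String × Int)) hnd, hk]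
  exact List.map_congr_left (fun b _ => by rw [groupA_getD])

-- closed form of B's pass-1 buckets
theorem bucketsB_items (s : List (String × String)) :
    (s.foldl (fun bk sp => if bk.contains (pvBase sp.1) then bk else bk.insert (pvBase sp.1) ([] : List (String × String)))
      PySem.Dict.empty).items
    = (pvBases s).map (fun b => (b, ([] : List (String × String)))) := by
  induction s using List.reverseRecOn with
  | nil => simp [pvBases, PySem.Dict.empty, PySem.Set.ofList]
  | append_singleton t x ih =>
    rw [List.foldl_append, List.foldl_cons, List.foldl_nil]
    have hcont : (t.foldl (fun bk sp => if bk.contains (pvBase sp.1) then bk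
          else bk.insert (pvBase sp.1) ([] : List (String × String))) PySem.Dict.empty).contains (pvBase x.1)
        = decide (pvBase x.1 ∈ pvBases t) := by
      rw [PySem.Dict.contains_eq_decide_mem_keys]
      simp [PySem.Dict.keys, ih]
    by_cases hm : pvBase x.1 ∈ pvBases t
    · rw [show pvBases (t ++ [x]) = pvBases t by
        simp only [pvBases, List.map_append, List.map_cons, List.map_nil, PySem.Set.ofList_append_singleton]
        exact PySem.Set.add_of_mem (by simpa [pvBases] using hm)]
      rw [if_pos (by rw [hcont]; simpa using hm)]
      exact ih
    · rw [if_neg (by rw [hcont]; simpa using hm)]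
      rw [PySem.Dict.items_insert_of_not_contains _ _ (by rw [hcont]; simpa using hm)]
      rw [show pvBases (t ++ [x]) = pvBases t ++ [pvBase x.1] by
        simp only [pvBases, List.map_append, List.map_cons, List.map_nil, PySem.Set.ofList_append_singleton]
        exact PySem.Set.add_of_not_mem (by simpa [pvBases] using hm)]
      simp [ih]

-- closed form of B's pass-1 max table
theorem maxB_get? (L : String → Int) (s : List (String × String)) (b : String) :
    (s.foldl (fun mt sp =>
      if !mt.contains (pvBase sp.1) || L sp.1 > mt.getD (pvBase sp.1) 0 then mt.insert (pvBase sp.1) (L sp.1) else mt)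
      PySem.Dict.empty).get? b
    = pvMax ((s.filter (fun sp => pvBase sp.1 == b)).map (fun sp => L sp.1)) := by
  induction s using List.reverseRecOn with
  | nil => simp [pvMax, PySem.Dict.empty, PySem.Dict.get?]
  | append_singleton t x ih =>
    rw [List.foldl_append, List.foldl_cons, List.foldl_nil, List.filter_append]
    by_cases hb : pvBase x.1 = b
    · subst hb
      rw [List.filter_cons, List.filter_nil]
      simp only [beq_self_eq_true, if_true, List.map_append, List.map_cons, List.map_nil]
      rw [pvMax_append_singleton]
      set ys := (t.filter (fun sp => pvBase sp.1 == pvBase x.1)).map (fun sp => L sp.1) with hys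
      set d := t.foldl (fun mt sp => if !mt.contains (pvBase sp.1) || L sp.1 > mt.getD (pvBase sp.1) 0
          then mt.insert (pvBase sp.1) (L sp.1) else mt) PySem.Dict.empty with hd
      cases hp : pvMax ys with
      | none =>
        have hc : d.contains (pvBase x.1) = false := by
          rw [PySem.Dict.contains_eq_isSome_get?, ih, hp]; rfl
        rw [if_pos (by rw [hc]; rfl)]
        exact PySem.Dict.get?_insert_self d (pvBase x.1) (L x.1)
      | some m =>
        have hc : d.get? (pvBase x.1) = some m := by rw [ih, hp]
        have hcont : d.contains (pvBase x.1) = true := by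
          rw [PySem.Dict.contains_eq_isSome_get?, hc]; rfl
        have hgd : d.getD (pvBase x.1) 0 = m := by rw [PySem.Dict.getD_eq_get?_getD, hc]; rfl
        by_cases hlt : L x.1 > m
        · rw [if_pos (by rw [hcont, hgd]; simp [hlt])]
          rw [PySem.Dict.get?_insert_self]
          exact congrArg some (max_eq_right (le_of_lt hlt)).symm
        · rw [if_neg (by rw [hcont, hgd]; simp [hlt]), hc]
          exact congrArg some (max_eq_left (by omega)).symm
    · have hstep : ∀ (d' : PySem.Dict String Int),
          (if (!d'.contains (pvBase x.1) || decide (L x.1 > d'.getD (pvBase x.1) 0)) = true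
            then d'.insert (pvBase x.1) (L x.1) else d').get? b = d'.get? b := by
        intro d'
        split
        · exact PySem.Dict.get?_insert_of_ne d' _ (fun h => hb h.symm)
        · rfl
      rw [hstep, ih]
      simp [show (pvBase x.1 == b) = false by simpa using hb]

-- one group's emission: A's max-and-filter over records equals B's bucket replay
theorem emit_eq (L : String → Int) (s : List (String × String)) (b : String)
    (mt : PySem.Dict String Int)
    (hM : mt.get? b = pvMax ((s.filter (fun sp => pvBase sp.1 == b)).map (fun sp => L sp.1)))
    (hmem : b ∈ pvBases s) (res : PySem.Dict String String × PySem.Dict String Int) :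
    ((pvGrp L s b).filter (fun sec => sec.2.2 == (PySem.List.max? ((pvGrp L s b).map (fun sec => sec.2.2)) (fun x => x)).getD 0)).foldl
      (fun res sec => (res.1.insert sec.1 sec.2.1, res.2.insert sec.1 sec.2.2)) res
    = ((s.filter (fun sp => pvBase sp.1 == b && (L sp.1 == mt.getD b 0))).map (fun sp => (sp.1, sp.2))).foldl
      (fun res np => (res.1.insert np.1 np.2, res.2.insert np.1 (L np.1))) res := by
  obtain ⟨sp0, hsp0, hb0⟩ : ∃ sp ∈ s, pvBase sp.1 = b := by
    have h1 : b ∈ s.map (fun sp => pvBase sp.1) := by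
      simpa [pvBases, PySem.Set.mem_ofList] using hmem
    simpa using h1
  have hmemG : sp0 ∈ s.filter (fun sp => pvBase sp.1 == b) := List.mem_filter.mpr ⟨hsp0, by simp [hb0]⟩
  have hys : ((pvGrp L s b).map (fun sec => sec.2.2)) = (s.filter (fun sp => pvBase sp.1 == b)).map (fun sp => L sp.1) := by
    simp [pvGrp, List.map_map, Function.comp_def, pvRec]
  cases hG : (s.filter (fun sp => pvBase sp.1 == b)).map (fun sp => L sp.1) with
  | nil => exact absurd hmemG (by simp [List.map_eq_nil_iff.mp hG])
  | cons y t' =>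
    have hmax : (PySem.List.max? ((pvGrp L s b).map (fun sec => sec.2.2)) (fun x => x)).getD 0 = t'.foldl max y := by
      rw [hys, hG, PySem.List.max?_id_cons]; rfl
    have hmt : mt.getD b 0 = t'.foldl max y := by
      rw [PySem.Dict.getD_eq_get?_getD, hM, hG]; rfl
    rw [hmax]
    have hfilterA : (pvGrp L s b).filter (fun sec => sec.2.2 == t'.foldl max y)
        = ((s.filter (fun sp => pvBase sp.1 == b)).filter (fun sp => L sp.1 == t'.foldl max y)).map (pvRec L) := by
      simp [pvGrp, List.filter_map, Function.comp_def, pvRec]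
    have hlistB : s.filter (fun sp => pvBase sp.1 == b && (L sp.1 == mt.getD b 0))
        = (s.filter (fun sp => pvBase sp.1 == b)).filter (fun sp => L sp.1 == t'.foldl max y) := by
      rw [List.filter_filter]
      exact List.filter_congr (fun sp _ => by rw [hmt, Bool.and_comm])
    rw [hfilterA, hlistB, List.foldl_map, List.foldl_map]
    rfl

-- closed form of B's pass-2 buckets
set_option maxHeartbeats 1000000 in
theorem pass2_items (L : String → Int) (s : List (String × String)) (mt : PySem.Dict String Int)
    (bk0 : PySem.Dict String (List (String × String)))
    (h0 : bk0.items = (pvBases s).map (fun b => (b, ([] : List (String × String))))) :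
    (s.foldl (fun bk sp => if L sp.1 == mt.getD (pvBase sp.1) 0
        then bk.modify (pvBase sp.1) [] (fun l => l ++ [(sp.1, sp.2)]) else bk) bk0).items
    = (pvBases s).map (fun b =>
        (b, (s.filter (fun sp => pvBase sp.1 == b && (L sp.1 == mt.getD b 0))).map (fun sp => (sp.1, sp.2)))) := by
  have hsplit : (s.foldl (fun bk sp => if L sp.1 == mt.getD (pvBase sp.1) 0
        then bk.modify (pvBase sp.1) [] (fun l => l ++ [(sp.1, sp.2)]) else bk) bk0)
      = (s.filter (fun sp => L sp.1 == mt.getD (pvBase sp.1) 0)).foldl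
        (fun bk sp => bk.modify (pvBase sp.1) [] (fun l => l ++ [(sp.1, sp.2)])) bk0 :=
    PySem.List.foldl_if_eq_foldl_filter _ _ _ _
  rw [hsplit]
  have hk0 : bk0.keys = pvBases s := by
    simp [PySem.Dict.keys, h0, List.map_map, Function.comp_def]
  have hnd0 : bk0.keys.Nodup := by rw [hk0]; exact PySem.Set.nodup_ofList _
  have hsub : ∀ y ∈ (s.filter (fun sp => L sp.1 == mt.getD (pvBase sp.1) 0)).map (fun sp => pvBase sp.1),
      y ∈ pvBases s := by
    intro y hy
    obtain ⟨sp, hsp, rfl⟩ := List.mem_map.mp hy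
    have : sp ∈ s := (List.mem_filter.mp hsp).1
    simp only [pvBases, PySem.Set.mem_ofList]
    exact List.mem_map_of_mem this
  have hk : ((s.filter (fun sp => L sp.1 == mt.getD (pvBase sp.1) 0)).foldl
      (fun bk sp => bk.modify (pvBase sp.1) [] (fun l => l ++ [(sp.1, sp.2)])) bk0).keys = pvBases s := by
    have h1 : ((s.filter (fun sp => L sp.1 == mt.getD (pvBase sp.1) 0)).foldl
        (fun bk sp => bk.modify (pvBase sp.1) [] (fun l => l ++ [(sp.1, sp.2)])) bk0).keys
        = PySem.Set.update bk0.keys ((s.filter (fun sp => L sp.1 == mt.getD (pvBase sp.1) 0)).map (fun sp => pvBase sp.1)) :=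
      PySem.Dict.keys_foldl_modify_key (l := s.filter (fun sp => L sp.1 == mt.getD (pvBase sp.1) 0))
        (key := fun sp : String × String => pvBase sp.1) (d0 := ([] : List (String × String)))
        (f := fun _ sp l => l ++ [(sp.1, sp.2)]) (d := bk0)
    rw [h1, hk0, PySem.Set.update_eq_append_filter]
    have hnil : ((PySem.Set.ofList ((s.filter (fun sp => L sp.1 == mt.getD (pvBase sp.1) 0)).map (fun sp => pvBase sp.1))).filter
        (fun y => !(PySem.Set.contains (pvBases s) y))) = [] := by
      rw [List.filter_eq_nil_iff]
      intro y hy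
      have hys : y ∈ pvBases s := hsub y (by simpa [PySem.Set.mem_ofList] using hy)
      simpa using hys
    rw [hnil, List.append_nil]
  have hnd : ((s.filter (fun sp => L sp.1 == mt.getD (pvBase sp.1) 0)).foldl
      (fun bk sp => bk.modify (pvBase sp.1) [] (fun l => l ++ [(sp.1, sp.2)])) bk0).keys.Nodup :=
    PySem.Dict.nodup_keys_foldl_modify_key (l := s.filter (fun sp => L sp.1 == mt.getD (pvBase sp.1) 0))
      (key := fun sp : String × String => pvBase sp.1) (d0 := ([] : List (String × String)))
      (f := fun _ sp l => l ++ [(sp.1, sp.2)]) (d := bk0) hnd0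
  rw [items_eq_keys_map _ ([] : List (String × String)) hnd, hk]
  refine List.map_congr_left (fun b hbmem => ?_)
  have he : (s.filter (fun sp => L sp.1 == mt.getD (pvBase sp.1) 0)).foldl
        (fun bk sp => bk.modify (pvBase sp.1) [] (fun l => l ++ [(sp.1, sp.2)])) bk0
      = ((s.filter (fun sp => L sp.1 == mt.getD (pvBase sp.1) 0)).map (fun sp => (pvBase sp.1, (sp.1, sp.2)))).foldl
        (fun d p => d.modify p.1 [] (fun x => x ++ [p.2])) bk0 :=
    (List.foldl_map (f := fun sp : String × String => (pvBase sp.1, (sp.1, sp.2)))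
      (g := fun (d : PySem.Dict String (List (String × String))) p => d.modify p.1 [] (fun x => x ++ [p.2]))
      (l := s.filter (fun sp => L sp.1 == mt.getD (pvBase sp.1) 0)) (init := bk0)).symm
  rw [he, PySem.Dict.getD_foldl_modify_append,
    getD_nil_of_items_const bk0 b (by rw [h0]; intro p hp; obtain ⟨c, _, rfl⟩ := List.mem_map.mp hp; rfl)]
  rw [List.filter_map, List.map_map]
  have hff : List.filter ((fun p => p.1 == b) ∘ fun sp : String × String => (pvBase sp.1, (sp.1, sp.2)))
        (s.filter (fun sp => L sp.1 == mt.getD (pvBase sp.1) 0))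
      = s.filter (fun sp => pvBase sp.1 == b && (L sp.1 == mt.getD b 0)) := by
    rw [List.filter_filter]
    refine List.filter_congr (fun sp _ => ?_)
    by_cases hbb : pvBase sp.1 = b
    · simp [hbb]
    · simp [show (pvBase sp.1 == b) = false from by simpa using hbb]
  rw [hff]
  rfl

-- the whole equivalence, for an arbitrary level table L
theorem pipelines_eq (L : String → Int) (s : List (String × String)) :
    (let grouped : PySem.Dict String (List (String × String × Int)) :=
      s.foldl (fun grouped sp =>
        (if grouped.contains (pvBase sp.1) then grouped else grouped.insert (pvBase sp.1) []).modify
          (pvBase sp.1) [] (fun g => g ++ [(sp.1, sp.2, L sp.1)])) PySem.Dict.empty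
     grouped.items.foldl (fun res bs =>
      let max_level := (PySem.List.max? (bs.2.map (fun sec => sec.2.2)) (fun x => x)).getD 0
      (bs.2.filter (fun sec => sec.2.2 == max_level)).foldl
        (fun res sec => (res.1.insert sec.1 sec.2.1, res.2.insert sec.1 sec.2.2)) res)
      ((PySem.Dict.empty : PySem.Dict String String), (PySem.Dict.empty : PySem.Dict String Int)))
    =
    (let p1 :=
      s.foldl (fun st sp =>
        (if !st.1.contains (pvBase sp.1) || L sp.1 > st.1.getD (pvBase sp.1) 0 then st.1.insert (pvBase sp.1) (L sp.1) else st.1,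
         if st.2.contains (pvBase sp.1) then st.2 else st.2.insert (pvBase sp.1) ([] : List (String × String))))
        ((PySem.Dict.empty : PySem.Dict String Int), (PySem.Dict.empty : PySem.Dict String (List (String × String))))
     let buckets := s.foldl (fun bk sp =>
        if L sp.1 == p1.1.getD (pvBase sp.1) 0 then bk.modify (pvBase sp.1) [] (fun l => l ++ [(sp.1, sp.2)]) else bk) p1.2
     buckets.items.foldl (fun res bp =>
        bp.2.foldl (fun res np => (res.1.insert np.1 np.2, res.2.insert np.1 (L np.1))) res)
       ((PySem.Dict.empty : PySem.Dict String String), (PySem.Dict.empty : PySem.Dict String Int))) := by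
  dsimp only
  have hsplitp1 : s.foldl (fun st sp =>
        (if !st.1.contains (pvBase sp.1) || L sp.1 > st.1.getD (pvBase sp.1) 0 then st.1.insert (pvBase sp.1) (L sp.1) else st.1,
         if st.2.contains (pvBase sp.1) then st.2 else st.2.insert (pvBase sp.1) ([] : List (String × String))))
        ((PySem.Dict.empty : PySem.Dict String Int), (PySem.Dict.empty : PySem.Dict String (List (String × String))))
      = (s.foldl (fun mt sp => if !mt.contains (pvBase sp.1) || L sp.1 > mt.getD (pvBase sp.1) 0
            then mt.insert (pvBase sp.1) (L sp.1) else mt) PySem.Dict.empty,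
         s.foldl (fun bk sp => if bk.contains (pvBase sp.1) then bk
            else bk.insert (pvBase sp.1) ([] : List (String × String))) PySem.Dict.empty) :=
    PySem.List.foldl_prod_mk
      (f := fun (mt : PySem.Dict String Int) (sp : String × String) =>
        if !mt.contains (pvBase sp.1) || L sp.1 > mt.getD (pvBase sp.1) 0 then mt.insert (pvBase sp.1) (L sp.1) else mt)
      (g := fun (bk : PySem.Dict String (List (String × String))) (sp : String × String) =>
        if bk.contains (pvBase sp.1) then bk else bk.insert (pvBase sp.1) ([] : List (String × String)))
      s PySem.Dict.empty PySem.Dict.empty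
  rw [hsplitp1]
  dsimp only
  rw [pass2_items L s _ _ (bucketsB_items s)]
  rw [groupA_items L s]
  rw [List.foldl_map, List.foldl_map]
  refine PySem.List.foldl_congr_mem _ _ _ _ (fun res b hbmem => ?_)
  exact emit_eq L s b _ (maxB_get? L s b) hbmem res

-- ===== VERDICT (by name: the statement is the Claim_ definition above) =====
theorem filter_max_level_sections_spec : Claim_equal_filter_max_level_sections := by
  intro s l _ _
  unfold Spec_filter_max_level_sections filter_max_level_sections filter_max_level_sections_alt
  have h := pipelines_eq (fun n => (PySem.Dict.ofList l).getD n 0) s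
  simp only at h ⊢
  rw [h]
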